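-- pv_equiv track=rewrite | github.com/gavinz0228/AlgoPractice | LeetCode/findSubstring.py | check
-- ===== SOURCE A (Python) =====
-- def check(s, words, wl):
--     ss = {}
--     for w in words:
--         if w in ss:
--             ss[w] = ss[w] + 1
--         else:
--             ss[w] = 1
--     idx = 0
--     eidx = len(s)
--     while idx < eidx:
--         curr = s[idx: idx + wl]
--         if curr in ss:
--             if ss[curr] == 1:
--                 del ss[curr]
--             else:
--                 ss[curr] = ss[curr] - 1
--             idx += wl
--         else:
--             return False
--     if len(ss) == 0:
--         return True
-- ===== SOURCE B (Python) =====
-- def check(s, words, wl):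
--     chunks = [s[i:i + wl] for i in range(0, len(s), wl)]
--     return sorted(chunks) == sorted(words)
-- ===== Notes on version B (the rewrite author's own statement) =====
-- stated objective: simpler
-- what changed: A streams wl-sized chunks left-to-right while destructively decrementing a shared word-count dict with early exit; B slices the whole chunk list in one comprehension and decides by sorting both lists and comparing them. Pre_ excludes wl = 0, on which B raises ValueError (range step 0), and the malformed corner wl < 0 with nonempty s and empty words, where A's False and B's vacuous True are both accidental values for a nonsense width.
-- intended difference: On inputs whose chunk multiset is a proper sub-multiset of words (wl >= 1, or an empty s), A falls off the end of the function and returns None where a boolean is expected; B returns False, the intended answer since s does not use up all the words. — e.g. on check("ab", ["ab", "cd"], 2): A returns none, B returns some false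
-- outside the precondition, e.g. on check('ab', ['ab'], 0): A returns False, B raises ValueError; on check('ab', [], -1): A returns False, B returns True
import Mathlib
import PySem

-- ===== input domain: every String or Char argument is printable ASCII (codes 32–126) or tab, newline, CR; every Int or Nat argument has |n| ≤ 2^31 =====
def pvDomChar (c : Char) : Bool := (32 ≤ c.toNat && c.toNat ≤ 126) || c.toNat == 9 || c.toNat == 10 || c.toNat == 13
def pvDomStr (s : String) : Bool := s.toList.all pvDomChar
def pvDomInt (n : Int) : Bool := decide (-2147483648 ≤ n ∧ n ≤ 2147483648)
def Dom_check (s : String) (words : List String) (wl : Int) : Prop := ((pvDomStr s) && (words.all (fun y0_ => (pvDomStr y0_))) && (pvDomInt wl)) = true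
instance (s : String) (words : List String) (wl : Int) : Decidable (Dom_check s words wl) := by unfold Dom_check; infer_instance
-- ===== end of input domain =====

-- B replaces A's streaming decrement-and-early-exit dict pass by slicing out the chunk
-- list in one comprehension and comparing the sorted chunk list with the sorted word
-- list (objective: simpler).

-- ===== PORT A =====
-- the while loop; fuel = words.length + 1 is enough (each recursive step removes one
-- occurrence from ss, and ss holds at most words.length occurrences), so the fuel-0
-- branch is unreachable from `check`.
def checkLoopA (s : String) (wl : Int) : Nat → Int → PySem.Dict String Int → Option Bool
  | 0, _, _ => none
  | fuel + 1, idx, ss =>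
    if idx < PySem.Str.len s then
      let curr := PySem.Str.slice s (some idx) (some (idx + wl))
      match ss.get? curr with
      | some n =>
        let ss' := if n = 1 then ss.erase curr else ss.insert curr (n - 1)
        checkLoopA s wl fuel (idx + wl) ss'
      | none => some false
    else
      if ss.size = 0 then some true else none

def check (s : String) (words : List String) (wl : Int) : Option Bool :=
  let ss := words.foldl
    (fun d w => if d.contains w then d.insert w ((d.get? w).getD 0 + 1) else d.insert w 1)
    PySem.Dict.empty
  checkLoopA s wl (words.length + 1) 0 ss

-- ===== PORT B =====
-- chunks = [s[i:i+wl] for i in range(0, len(s), wl)]; return sorted(chunks) == sorted(words)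
def check_alt (s : String) (words : List String) (wl : Int) : Option Bool :=
  let chunks := (PySem.List.pyRange 0 (PySem.Str.len s) wl).map
    (fun i => PySem.Str.slice s (some i) (some (i + wl)))
  some (decide (PySem.List.sorted chunks (fun x => x) false
      = PySem.List.sorted words (fun x => x) false))

-- ===== PRECONDITION & SPEC =====
-- Pre_ excludes wl = 0, on which B raises ValueError (range with step 0), and the
-- malformed corner wl < 0 with nonempty s and empty words, where A's False (from slicing
-- with a nonsense width) and B's vacuous True (zero chunks) are both accidental.
def Pre_check (s : String) (words : List String) (wl : Int) : Prop :=
  wl ≠ 0 ∧ ¬(wl < 0 ∧ s ≠ "" ∧ words = [])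
instance (s : String) (words : List String) (wl : Int) : Decidable (Pre_check s words wl) := by unfold Pre_check; infer_instance
def pvWitness_check : String × List String × Int := ("abcd", ["cd", "ab"], 2)

-- the chunk decomposition of the input string, for stating D_ (independent of the ports);
-- fuel-driven so that it is structurally recursive: fuel = l.length always suffices for w ≥ 1
def pvChunksGo : Nat → List Char → Nat → List (List Char)
  | 0, _, _ => []
  | _ + 1, [], _ => []
  | fuel + 1, c :: t, w => (c :: t).take w :: pvChunksGo fuel ((c :: t).drop w) w

def pvChunks (l : List Char) (w : Nat) : List (List Char) :=
  if w = 0 then [] else pvChunksGo l.length l w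

-- On inputs whose chunk multiset is a proper sub-multiset of words (wl ≥ 1, or an empty
-- s whose chunk list is empty), A falls off the end of the function and returns None where
-- a boolean is expected; B returns False, the intended answer since s does not use up all
-- the words.
def D_check (s : String) (words : List String) (wl : Int) : Prop :=
  (1 ≤ wl ∨ s = "") ∧
  (∀ c ∈ (pvChunks s.toList wl.toNat).map String.ofList,
      ((pvChunks s.toList wl.toNat).map String.ofList).count c ≤ words.count c) ∧
  (∃ w ∈ words, ((pvChunks s.toList wl.toNat).map String.ofList).count w < words.count w)
instance (s : String) (words : List String) (wl : Int) : Decidable (D_check s words wl) := by unfold D_check; infer_instance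

def Spec_check (s : String) (words : List String) (wl : Int) (out : Option Bool) : Prop := ¬ D_check s words wl → out = check_alt s words wl
instance (s : String) (words : List String) (wl : Int) (out : Option Bool) : Decidable (Spec_check s words wl out) := by unfold Spec_check; infer_instance

def pvDiffWitness_check : String × List String × Int := ("ab", ["ab", "cd"], 2)
def pvDiffWitnessOut_check : (Option Bool) × (Option Bool) := (none, some false)

-- ===== CLAIM (what is proved, stated in full; the proofs are below) =====
def Claim_unchanged_check : Prop := ∀ (s : String) (words : List String) (wl : Int), Dom_check s words wl → Pre_check s words wl → Spec_check s words wl (check s words wl)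
def Claim_changed_check : Prop := Dom_check (pvDiffWitness_check.1) (pvDiffWitness_check.2.1) (pvDiffWitness_check.2.2) ∧ Pre_check (pvDiffWitness_check.1) (pvDiffWitness_check.2.1) (pvDiffWitness_check.2.2) ∧ D_check (pvDiffWitness_check.1) (pvDiffWitness_check.2.1) (pvDiffWitness_check.2.2) ∧ check (pvDiffWitness_check.1) (pvDiffWitness_check.2.1) (pvDiffWitness_check.2.2) = pvDiffWitnessOut_check.1 ∧ check_alt (pvDiffWitness_check.1) (pvDiffWitness_check.2.1) (pvDiffWitness_check.2.2) = pvDiffWitnessOut_check.2 ∧ pvDiffWitnessOut_check.1 ≠ pvDiffWitnessOut_check.2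
def Claim_exact_check : Prop := ∀ (s : String) (words : List String) (wl : Int), Dom_check s words wl → Pre_check s words wl → D_check s words wl → check s words wl ≠ check_alt s words wl

-- ===== LEMMAS AND PROOFS =====

-- abstract view of A's loop: consume the chunk stream against the multiset of words
def absLoop : List String → List String → Option Bool
  | [], m => if m = [] then some true else none
  | c :: rest, m => if c ∈ m then absLoop rest (m.erase c) else some false

-- ss represents the multiset m
def RDict (m : List String) (d : PySem.Dict String Int) : Prop :=
  ∀ k, d.get? k = if m.count k = 0 then none else some ((m.count k : Int))

theorem get?_erase (d : PySem.Dict String Int) (c k : String) :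
    (d.erase c).get? k = if k = c then none else d.get? k := by
  obtain ⟨items⟩ := d
  simp only [PySem.Dict.erase, PySem.Dict.get?]
  by_cases hk : k = c
  · subst hk
    rw [if_pos rfl]
    have hfind : List.find? (fun p => p.1 == k) (items.filter (fun p => !(p.1 == k))) = none := by
      rw [List.find?_eq_none]
      intro x hx
      have := List.of_mem_filter hx
      simpa using this
    simp [hfind]
  · rw [if_neg hk]
    congr 1
    induction items with
    | nil => rfl
    | cons p t ih =>
      rw [List.filter_cons]
      by_cases hp : (!(p.1 == c)) = true
      · rw [if_pos hp]
        by_cases h2 : (p.1 == k) = true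
        · simp only [List.find?_cons, h2]
        · have h2' : (p.1 == k) = false := by simpa using h2
          simp only [List.find?_cons, h2', ih]
      · rw [if_neg hp]
        have hpc : p.1 = c := by simpa using hp
        have h2 : (p.1 == k) = false := by
          simp only [hpc, beq_eq_false_iff_ne]
          exact fun h => hk h.symm
        conv_rhs => rw [List.find?_cons]
        simp only [h2, ih]

theorem RDict_counter (ws : List String) : RDict ws (PySem.Dict.counter ws) := by
  intro k
  by_cases hmem : k ∈ ws
  · have hcnt : ws.count k ≠ 0 := by
      have := List.count_pos_iff.mpr hmem; omega
    rw [if_neg hcnt]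
    have hsome : ((PySem.Dict.counter ws).get? k).isSome := by
      rw [← PySem.Dict.contains_eq_isSome_get?, PySem.Dict.contains_counter]
      simpa using hmem
    obtain ⟨v, hv⟩ := Option.isSome_iff_exists.mp hsome
    have hgd := PySem.Dict.getD_counter ws k
    rw [PySem.Dict.getD, hv] at hgd
    simp at hgd
    rw [hv, hgd]
  · have hcnt : ws.count k = 0 := by
      simpa using List.count_eq_zero.mpr hmem
    rw [if_pos hcnt]
    rw [← Option.not_isSome_iff_eq_none, ← PySem.Dict.contains_eq_isSome_get?,
      PySem.Dict.contains_counter]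
    simpa using hmem

theorem RDict_count_of_get? {m : List String} {d : PySem.Dict String Int} {c : String} {v : Int}
    (h : RDict m d) (hv : d.get? c = some v) : m.count c ≠ 0 ∧ (m.count c : Int) = v := by
  have hc := h c
  rw [hv] at hc
  by_cases h0 : m.count c = 0
  · rw [if_pos h0] at hc; exact absurd hc (by simp)
  · rw [if_neg h0] at hc
    exact ⟨h0, by simpa using hc.symm⟩

theorem RDict_erase {m : List String} {d : PySem.Dict String Int} {c : String}
    (h : RDict m d) (hv : d.get? c = some 1) : RDict (m.erase c) (d.erase c) := by
  obtain ⟨h0, h1⟩ := RDict_count_of_get? h hv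
  have hcnt1 : m.count c = 1 := by exact_mod_cast h1
  intro k
  rw [get?_erase]
  by_cases hk : k = c
  · subst hk
    rw [if_pos rfl, if_pos (by rw [List.count_erase_self]; omega)]
  · rw [if_neg hk, h k, List.count_erase_of_ne hk]

theorem RDict_insert {m : List String} {d : PySem.Dict String Int} {c : String} {v : Int}
    (h : RDict m d) (hv : d.get? c = some v) (hv1 : v ≠ 1) :
    RDict (m.erase c) (d.insert c (v - 1)) := by
  obtain ⟨h0, h1⟩ := RDict_count_of_get? h hv
  have hcnt2 : 2 ≤ m.count c := by
    rcases Nat.lt_or_ge (m.count c) 2 with hlt | hge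
    · interval_cases hm : m.count c <;> simp_all
    · exact hge
  intro k
  rw [PySem.Dict.get?_insert]
  by_cases hk : k = c
  · subst hk
    rw [if_pos rfl]
    have hne : (m.erase k).count k ≠ 0 := by
      rw [List.count_erase_self]; omega
    rw [if_neg hne, List.count_erase_self]
    congr 1
    rw [← h1]
    omega
  · rw [if_neg hk, h k, List.count_erase_of_ne hk]

theorem RDict_size {m : List String} {d : PySem.Dict String Int} (h : RDict m d) :
    d.size = 0 ↔ m = [] := by
  constructor
  · intro hs
    have hitems : d.items = [] := List.length_eq_zero_iff.mp hs
    by_contra hm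
    obtain ⟨x, hx⟩ := List.exists_mem_of_ne_nil m hm
    have hcnt : m.count x ≠ 0 := by
      have := List.count_pos_iff.mpr hx; omega
    have := h x
    rw [if_neg hcnt] at this
    simp [PySem.Dict.get?, hitems] at this
  · intro hm
    subst hm
    cases hitems : d.items with
    | nil => simp [PySem.Dict.size, hitems]
    | cons p t =>
      exfalso
      have := h p.1
      simp [PySem.Dict.get?, hitems] at this

theorem ssA_eq_counter (words : List String) :
    words.foldl
      (fun d w => if d.contains w then d.insert w ((d.get? w).getD 0 + 1) else d.insert w 1)
      PySem.Dict.empty = PySem.Dict.counter words := by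
  have hfun : (fun (d : PySem.Dict String Int) (w : String) =>
      if d.contains w then d.insert w ((d.get? w).getD 0 + 1) else d.insert w 1)
      = fun d w => d.insert w (d.getD w 0 + 1) := by
    funext d w
    by_cases hcw : d.contains w
    · simp [hcw, PySem.Dict.getD]
    · have h0 : d.getD w 0 = 0 :=
        PySem.Dict.getD_of_not_contains d 0 (by simpa using hcw)
      simp [hcw, h0]
  rw [hfun, PySem.Dict.foldl_insert_getD_add_one_eq_counter]

theorem pvChunks_nil (w : Nat) : pvChunks [] w = [] := by
  unfold pvChunks
  cases w <;> simp [pvChunksGo]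

theorem pvChunksGo_fuel (w : Nat) (hw : 1 ≤ w) :
    ∀ (fuel fuel' : Nat) (l : List Char), l.length ≤ fuel → l.length ≤ fuel' →
      pvChunksGo fuel l w = pvChunksGo fuel' l w := by
  intro fuel
  induction fuel with
  | zero =>
    intro fuel' l hl _
    have : l = [] := List.length_eq_zero_iff.mp (by omega)
    subst this
    cases fuel' <;> simp [pvChunksGo]
  | succ f ih =>
    intro fuel' l hl hl'
    cases l with
    | nil => cases fuel' <;> simp [pvChunksGo]
    | cons c t =>
      cases fuel' with
      | zero => simp at hl'
      | succ f' =>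
        simp only [pvChunksGo]
        congr 1
        apply ih
        · simp at hl ⊢; omega
        · simp at hl' ⊢; omega

theorem pvChunks_cons (l : List Char) (w : Nat) (hw : 1 ≤ w) (hl : l ≠ []) :
    pvChunks l w = l.take w :: pvChunks (l.drop w) w := by
  obtain ⟨c, t, rfl⟩ := List.exists_cons_of_ne_nil hl
  unfold pvChunks
  rw [if_neg (by omega), if_neg (by omega)]
  have hlen : (c :: t).length = t.length + 1 := by simp
  rw [hlen]
  simp only [pvChunksGo]
  congr 1
  apply pvChunksGo_fuel w hw
  · simp; omega
  · simp

-- chunk list of the suffix from j, as strings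
def chunksFrom (s : String) (wl : Int) (j : Nat) : List String :=
  (pvChunks (s.toList.drop j) wl.toNat).map String.ofList

theorem chunksFrom_cons (s : String) (wl : Int) (j : Nat) (hw : 1 ≤ wl)
    (hj : j < s.toList.length) :
    chunksFrom s wl j
      = String.ofList ((s.toList.drop j).take wl.toNat) :: chunksFrom s wl (j + wl.toNat) := by
  have hne : s.toList.drop j ≠ [] := by
    intro hc
    rw [List.drop_eq_nil_iff] at hc
    omega
  unfold chunksFrom
  rw [pvChunks_cons _ _ (by omega) hne, List.map_cons, List.drop_drop]

theorem chunksFrom_end (s : String) (wl : Int) (j : Nat)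
    (hj : s.toList.length ≤ j) : chunksFrom s wl j = [] := by
  unfold chunksFrom
  rw [List.drop_eq_nil_iff.mpr hj, pvChunks_nil, List.map_nil]

theorem slice_chunk (s : String) (wl : Int) (j : Nat) (hw : 1 ≤ wl) :
    PySem.Str.slice s (some (j : Int)) (some ((j : Int) + wl))
      = String.ofList ((s.toList.drop j).take wl.toNat) := by
  apply String.toList_inj.mp
  rw [PySem.Str.toList_slice, PySem.Chars.slice_eq_listSlice,
    PySem.List.slice_toNat s.toList (by positivity) (by omega)]
  rw [String.toList_ofList]
  congr 1
  omega

theorem loopA_eq_absLoop (s : String) (wl : Int) (hw : 1 ≤ wl) :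
    ∀ (fuel : Nat) (m : List String) (ss : PySem.Dict String Int) (j : Nat),
      RDict m ss → m.length < fuel →
      checkLoopA s wl fuel (j : Int) ss = absLoop (chunksFrom s wl j) m := by
  intro fuel
  induction fuel with
  | zero => intro m ss j _ h; exact absurd h (by omega)
  | succ f ih =>
    intro m ss j hR hlt
    by_cases hj : (j : Int) < PySem.Str.len s
    · have hjn : j < s.toList.length := by
        simp only [PySem.Str.len] at hj; exact_mod_cast hj
      have hch := chunksFrom_cons s wl j hw hjn
      have hcurr := slice_chunk s wl j hw
      have hidx : ((j : Int) + wl) = ((j + wl.toNat : Nat) : Int) := by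
        push_cast
        omega
      rw [hch]
      simp only [checkLoopA]
      rw [if_pos hj, hcurr]
      cases hss : ss.get? (String.ofList ((s.toList.drop j).take wl.toNat)) with
      | none =>
        dsimp only
        have hnm : String.ofList ((s.toList.drop j).take wl.toNat) ∉ m := by
          intro hmem
          have hcnt := List.count_pos_iff.mpr hmem
          have := hR (String.ofList ((s.toList.drop j).take wl.toNat))
          rw [hss, if_neg (by omega)] at this
          exact absurd this (by simp)
        simp only [absLoop]
        rw [if_neg hnm]
      | some v =>
        dsimp only
        obtain ⟨h0, h1⟩ := RDict_count_of_get? hR hss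
        have hmem : String.ofList ((s.toList.drop j).take wl.toNat) ∈ m :=
          List.count_pos_iff.mp (by omega)
        have hlenm := List.length_erase_of_mem hmem
        have hlenm' : 1 ≤ m.length := List.length_pos_iff.mpr (by rintro rfl; simp at hmem)
        simp only [absLoop]
        rw [if_pos hmem]
        by_cases hv1 : v = 1
        · rw [if_pos hv1]
          have ihs := ih (m.erase (String.ofList ((s.toList.drop j).take wl.toNat)))
            (ss.erase (String.ofList ((s.toList.drop j).take wl.toNat)))
            (j + wl.toNat) (RDict_erase hR (hv1 ▸ hss)) (by omega)
          rw [← hidx] at ihs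
          exact ihs
        · rw [if_neg hv1]
          have ihs := ih (m.erase (String.ofList ((s.toList.drop j).take wl.toNat)))
            ((ss.insert (String.ofList ((s.toList.drop j).take wl.toNat)) (v - 1)))
            (j + wl.toNat) (RDict_insert hR hss hv1) (by omega)
          rw [← hidx] at ihs
          exact ihs
    · have hj' : s.toList.length ≤ j := by
        simp only [PySem.Str.len, not_lt] at hj; exact_mod_cast hj
      rw [chunksFrom_end s wl j hj']
      simp only [checkLoopA, absLoop]
      rw [if_neg hj]
      have hsz := RDict_size hR
      by_cases hm : m = []
      · rw [if_pos (hsz.mpr hm), if_pos hm]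
      · rw [if_neg (fun h0 => hm (hsz.mp h0)), if_neg hm]

theorem pyRange_pos_nil (a b s : Int) (hs : 0 < s) (hab : b ≤ a) :
    PySem.List.pyRange a b s = [] := by
  rw [PySem.List.pyRange_of_pos a b hs, if_neg (by omega)]
  simp

theorem pyRange_pos_cons (a b s : Int) (hs : 0 < s) (hab : a < b) :
    PySem.List.pyRange a b s = a :: PySem.List.pyRange (a + s) b s := by
  rw [PySem.List.pyRange_of_pos a b hs, PySem.List.pyRange_of_pos (a + s) b hs]
  rw [if_pos hab]
  have hdiv : (b - a + s - 1) / s = (b - (a + s) + s - 1) / s + 1 := by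
    have : b - a + s - 1 = (b - (a + s) + s - 1) + 1 * s := by ring
    rw [this, Int.add_mul_ediv_right _ _ (by omega : s ≠ 0)]
  by_cases h2 : a + s < b
  · rw [if_pos h2, hdiv]
    have hnn : 0 ≤ (b - (a + s) + s - 1) / s := Int.ediv_nonneg (by omega) (by omega)
    rw [show ((b - (a + s) + s - 1) / s + 1).toNat = ((b - (a + s) + s - 1) / s).toNat + 1 by omega]
    rw [List.range_succ_eq_map, List.map_cons, List.map_map]
    congr 1
    · simp
    · apply List.map_congr_left
      intro k _
      simp only [Function.comp]
      push_cast
      ring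
  · rw [if_neg h2]
    have hz : (b - (a + s) + s - 1) / s = 0 :=
      Int.ediv_eq_zero_of_lt (by omega) (by omega)
    rw [hdiv, hz]
    simp

theorem altChunks_eq (s : String) (wl : Int) (hw : 1 ≤ wl) :
    ∀ (n j : Nat), s.toList.length ≤ j + n →
    (PySem.List.pyRange (j : Int) (PySem.Str.len s) wl).map
        (fun i => PySem.Str.slice s (some i) (some (i + wl)))
      = chunksFrom s wl j := by
  intro n
  induction n with
  | zero =>
    intro j hj
    have hj' : s.toList.length ≤ j := by omega
    have hlen : PySem.Str.len s ≤ (j : Int) := by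
      simp only [PySem.Str.len]
      exact_mod_cast hj'
    rw [pyRange_pos_nil _ _ _ (by omega) hlen, List.map_nil,
      chunksFrom_end s wl j hj']
  | succ n ih =>
    intro j hj
    by_cases hjl : j < s.toList.length
    · have hjlt : (j : Int) < PySem.Str.len s := by
        simp only [PySem.Str.len]
        exact_mod_cast hjl
      rw [pyRange_pos_cons _ _ _ (by omega) hjlt, List.map_cons,
        slice_chunk s wl j hw, chunksFrom_cons s wl j hw hjl]
      congr 1
      have hidx : ((j : Int) + wl) = ((j + wl.toNat : Nat) : Int) := by
        push_cast
        omega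
      rw [hidx]
      exact ih (j + wl.toNat) (by omega)
    · have hj' : s.toList.length ≤ j := by omega
      have hlen : PySem.Str.len s ≤ (j : Int) := by
        simp only [PySem.Str.len]
        exact_mod_cast hj'
      rw [pyRange_pos_nil _ _ _ (by omega) hlen, List.map_nil,
        chunksFrom_end s wl j hj']

-- the three-way characterisation of absLoop by counts
theorem absLoop_false (cs m : List String)
    (h : ∃ c ∈ cs, m.count c < cs.count c) : absLoop cs m = some false := by
  induction cs generalizing m with
  | nil => obtain ⟨c, hc, -⟩ := h; exact absurd hc (List.not_mem_nil)
  | cons c rest ih =>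
    simp only [absLoop]
    by_cases hcm : c ∈ m
    · rw [if_pos hcm]
      apply ih
      obtain ⟨x, hx, hlt⟩ := h
      have hc1 : 1 ≤ m.count c := List.count_pos_iff.mpr hcm
      by_cases hxc : x = c
      · subst hxc
        rw [List.count_cons_self] at hlt
        refine ⟨x, List.count_pos_iff.mp (by omega), ?_⟩
        rw [List.count_erase_self]; omega
      · refine ⟨x, ?_, ?_⟩
        · rcases List.mem_cons.mp hx with h' | h'
          · exact absurd h' hxc
          · exact h'
        · rw [List.count_erase_of_ne hxc]
          rwa [List.count_cons_of_ne (Ne.symm hxc)] at hlt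
    · rw [if_neg hcm]

theorem absLoop_none (cs m : List String)
    (h1 : ∀ c ∈ cs, cs.count c ≤ m.count c)
    (h2 : ∃ w ∈ m, cs.count w < m.count w) : absLoop cs m = none := by
  induction cs generalizing m with
  | nil =>
    obtain ⟨w, hw, -⟩ := h2
    simp only [absLoop]
    rw [if_neg (by rintro rfl; exact List.not_mem_nil hw)]
  | cons c rest ih =>
    have hcm : c ∈ m := by
      have := h1 c List.mem_cons_self
      rw [List.count_cons_self] at this
      exact List.count_pos_iff.mp (by omega)
    have hc1 : 1 ≤ m.count c := List.count_pos_iff.mpr hcm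
    simp only [absLoop]
    rw [if_pos hcm]
    apply ih
    · intro x hx
      have := h1 x (List.mem_cons_of_mem _ hx)
      by_cases hxc : x = c
      · subst hxc
        rw [List.count_cons_self] at this
        rw [List.count_erase_self]
        omega
      · rw [List.count_cons_of_ne (Ne.symm hxc)] at this
        rw [List.count_erase_of_ne hxc]
        omega
    · obtain ⟨w, hw, hlt⟩ := h2
      by_cases hwc : w = c
      · subst hwc
        rw [List.count_cons_self] at hlt
        refine ⟨w, ?_, ?_⟩
        · exact List.count_pos_iff.mp (by rw [List.count_erase_self]; omega)
        · rw [List.count_erase_self]; omega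
      · refine ⟨w, (List.mem_erase_of_ne hwc).mpr hw, ?_⟩
        rw [List.count_erase_of_ne hwc]
        rwa [List.count_cons_of_ne (Ne.symm hwc)] at hlt

theorem absLoop_true (cs m : List String)
    (h : ∀ a, cs.count a = m.count a) : absLoop cs m = some true := by
  induction cs generalizing m with
  | nil =>
    have hm : m = [] := by
      apply List.eq_nil_iff_forall_not_mem.mpr
      intro x hx
      have := List.count_pos_iff.mpr hx
      have := h x
      simp only [List.count_nil] at this
      omega
    simp only [absLoop, if_pos hm]
  | cons c rest ih =>
    have hcm : c ∈ m := by
      have := h c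
      rw [List.count_cons_self] at this
      exact List.count_pos_iff.mp (by omega)
    have hc1 : 1 ≤ m.count c := List.count_pos_iff.mpr hcm
    simp only [absLoop]
    rw [if_pos hcm]
    apply ih
    intro a
    by_cases hac : a = c
    · subst hac
      have := h a
      rw [List.count_cons_self] at this
      rw [List.count_erase_self]
      omega
    · have := h a
      rw [List.count_cons_of_ne (Ne.symm hac)] at this
      rw [List.count_erase_of_ne hac]
      omega

theorem check_eq_absLoop (s : String) (words : List String) (wl : Int) (hw : 1 ≤ wl) :
    check s words wl = absLoop (chunksFrom s wl 0) words := by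
  have hA : check s words wl
      = checkLoopA s wl (words.length + 1) 0 (PySem.Dict.counter words) := by
    simp only [check, ssA_eq_counter]
  rw [hA, show (0 : Int) = ((0 : Nat) : Int) by simp]
  exact loopA_eq_absLoop s wl hw (words.length + 1) words
    (PySem.Dict.counter words) 0 (RDict_counter words) (by omega)

theorem check_alt_eq (s : String) (words : List String) (wl : Int) (hw : 1 ≤ wl) :
    check_alt s words wl
      = some (decide (PySem.List.sorted (chunksFrom s wl 0) (fun x => x) false
          = PySem.List.sorted words (fun x => x) false)) := by
  unfold check_alt
  have h0 := altChunks_eq s wl hw s.toList.length 0 (by omega)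
  rw [show ((0 : Nat) : Int) = (0 : Int) by simp] at h0
  rw [h0]


-- A's loop always returns False for a negative step and a nonempty string: the index only
-- decreases, and every iteration either fails the lookup or removes one occurrence from ss
theorem loopA_neg (s : String) (wl : Int) (hw : wl ≤ 0) :
    ∀ (fuel : Nat) (m : List String) (ss : PySem.Dict String Int) (idx : Int),
      idx < PySem.Str.len s → RDict m ss → m.length < fuel →
      checkLoopA s wl fuel idx ss = some false := by
  intro fuel
  induction fuel with
  | zero => intro m ss idx _ _ h; exact absurd h (by omega)
  | succ f ih =>
    intro m ss idx hidx hR hlt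
    simp only [checkLoopA]
    rw [if_pos hidx]
    cases hss : ss.get? (PySem.Str.slice s (some idx) (some (idx + wl))) with
    | none => rfl
    | some v =>
      dsimp only
      obtain ⟨h0, h1⟩ := RDict_count_of_get? hR hss
      have hmem : PySem.Str.slice s (some idx) (some (idx + wl)) ∈ m :=
        List.count_pos_iff.mp (by omega)
      have hlenm := List.length_erase_of_mem hmem
      have hlenm' : 1 ≤ m.length := List.length_pos_iff.mpr (by rintro rfl; simp at hmem)
      by_cases hv1 : v = 1
      · rw [if_pos hv1]
        exact ih (m.erase (PySem.Str.slice s (some idx) (some (idx + wl))))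
          (ss.erase (PySem.Str.slice s (some idx) (some (idx + wl))))
          (idx + wl) (by omega) (RDict_erase hR (hv1 ▸ hss)) (by omega)
      · rw [if_neg hv1]
        exact ih (m.erase (PySem.Str.slice s (some idx) (some (idx + wl))))
          (ss.insert (PySem.Str.slice s (some idx) (some (idx + wl))) (v - 1))
          (idx + wl) (by omega) (RDict_insert hR hss hv1) (by omega)

theorem pyRange_nonpos_nil (a b st : Int) (hst : st ≤ 0) (hab : a ≤ b) :
    PySem.List.pyRange a b st = [] := by
  unfold PySem.List.pyRange
  by_cases h0 : st = 0
  · rw [if_pos h0]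
  · rw [if_neg h0, if_neg (by omega), if_neg (by omega)]
    simp

theorem len_pos_of_ne_empty (s : String) (hs : s ≠ "") : 0 < PySem.Str.len s := by
  have hne : s.toList ≠ [] := fun hc => hs (String.toList_inj.mp (by rw [hc]; rfl))
  have := List.length_pos_iff.mpr hne
  simp only [PySem.Str.len]
  exact_mod_cast this

theorem sorted_words_ne_nil (words : List String) (hw : words ≠ []) :
    PySem.List.sorted words (fun x => x) false ≠ [] := by
  intro h
  exact hw ((PySem.List.sorted_eq_nil_iff words _ false).mp h)

theorem toList_eq_nil_of_empty (s : String) (hs : s = "") : s.toList = [] := by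
  subst hs; rfl

theorem D_of_empty (s : String) (words : List String) (wl : Int)
    (hs : s = "") (hw : words ≠ []) : D_check s words wl := by
  obtain ⟨w0, hw0⟩ := List.exists_mem_of_ne_nil words hw
  refine ⟨Or.inr hs, ?_, ?_⟩
  · intro c hc
    rw [toList_eq_nil_of_empty s hs, pvChunks_nil, List.map_nil] at hc
    exact absurd hc List.not_mem_nil
  · refine ⟨w0, hw0, ?_⟩
    rw [toList_eq_nil_of_empty s hs, pvChunks_nil, List.map_nil, List.count_nil]
    exact List.count_pos_iff.mpr hw0

theorem check_empty (words : List String) (wl : Int) :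
    check "" words wl = if words = [] then some true else none := by
  have hA : check "" words wl
      = checkLoopA "" wl (words.length + 1) 0 (PySem.Dict.counter words) := by
    simp only [check, ssA_eq_counter]
  rw [hA]
  simp only [checkLoopA]
  rw [if_neg (by simp [PySem.Str.len])]
  have hsz := RDict_size (RDict_counter words)
  by_cases hm : words = []
  · rw [if_pos (hsz.mpr hm), if_pos hm]
  · rw [if_neg (fun h0 => hm (hsz.mp h0)), if_neg hm]

theorem pyRange_self (a st : Int) : PySem.List.pyRange a a st = [] := by
  unfold PySem.List.pyRange
  by_cases h0 : st = 0
  · rw [if_pos h0]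
  · rw [if_neg h0]
    have h1 : ¬ a < a := lt_irrefl a
    split_ifs <;> simp

theorem check_alt_empty (words : List String) (wl : Int) :
    check_alt "" words wl
      = some (decide (([] : List String) = PySem.List.sorted words (fun x => x) false)) := by
  unfold check_alt
  have hlen : PySem.Str.len "" = 0 := by simp [PySem.Str.len]
  rw [hlen, pyRange_self 0 wl, List.map_nil]
  congr 1

theorem check_alt_nonpos (s : String) (words : List String) (wl : Int) (hw : wl ≤ 0) :
    check_alt s words wl
      = some (decide (([] : List String) = PySem.List.sorted words (fun x => x) false)) := by
  unfold check_alt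
  have hlen : (0 : Int) ≤ PySem.Str.len s := by
    simp only [PySem.Str.len]; positivity
  rw [pyRange_nonpos_nil 0 (PySem.Str.len s) wl hw hlen, List.map_nil]
  congr 1

-- ===== VERDICT (by name: the statement is the Claim_ definition above) =====
theorem check_spec : Claim_unchanged_check := by
  intro s words wl _ hpre hnD
  obtain ⟨hw0, hneg⟩ := hpre
  by_cases hw : 1 ≤ wl
  case neg =>
    -- wl ≤ -1
    have hwneg : wl < 0 := by omega
    by_cases hs : s = ""
    · -- empty string: both sides reduce to the empty chunk list
      have hwords : words = [] := by
        by_contra hwne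
        exact hnD (D_of_empty s words wl hs hwne)
      subst hs; subst hwords
      rw [check_empty, check_alt_nonpos "" [] wl (by omega)]
      simp [PySem.List.sorted]
    · have hwords : words ≠ [] := fun hc => hneg ⟨hwneg, hs, hc⟩
      rw [check_alt_nonpos s words wl (by omega)]
      have hA : check s words wl = some false := by
        have hAe : check s words wl
            = checkLoopA s wl (words.length + 1) 0 (PySem.Dict.counter words) := by
          simp only [check, ssA_eq_counter]
        rw [hAe]
        exact loopA_neg s wl (by omega) (words.length + 1) words
          (PySem.Dict.counter words) 0 (len_pos_of_ne_empty s hs)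
          (RDict_counter words) (by omega)
      rw [hA]
      have hne := sorted_words_ne_nil words hwords
      simp [Ne.symm hne]
  rw [check_eq_absLoop s words wl hw, check_alt_eq s words wl hw]
  set cs := chunksFrom s wl 0 with hcs
  by_cases hbr1 : ∃ c ∈ cs, words.count c < cs.count c
  · rw [absLoop_false cs words hbr1]
    have hnp : ¬ cs.Perm words := by
      intro hp
      obtain ⟨c, -, hlt⟩ := hbr1
      have := List.perm_iff_count.mp hp c
      omega
    have : ¬ (PySem.List.sorted cs (fun x => x) false
        = PySem.List.sorted words (fun x => x) false) := by
      intro hsort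
      exact hnp ((PySem.List.sorted_id_eq_sorted_id_iff_perm cs words).mp hsort)
    simp [this]
  · push Not at hbr1
    by_cases hbr2 : ∃ w ∈ words, words.count w ≠ cs.count w
    · exfalso
      apply hnD
      have hcseq : (pvChunks s.toList wl.toNat).map String.ofList = cs := by
        rw [hcs]
        unfold chunksFrom
        rw [List.drop_zero]
      rw [D_check, hcseq]
      refine ⟨Or.inl hw, ?_, ?_⟩
      · intro c hc
        exact hbr1 c hc
      · obtain ⟨w, hwm, hne⟩ := hbr2
        refine ⟨w, hwm, ?_⟩
        by_cases hwcs : w ∈ cs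
        · have := hbr1 w hwcs
          omega
        · have : cs.count w = 0 := by simpa using List.count_eq_zero.mpr hwcs
          have hpos := List.count_pos_iff.mpr hwm
          omega
    · push Not at hbr2
      have hcnt : ∀ a, cs.count a = words.count a := by
        intro a
        by_cases hacs : a ∈ cs
        · have h1 := hbr1 a hacs
          by_cases haw : a ∈ words
          · have := hbr2 a haw; omega
          · have : words.count a = 0 := by simpa using List.count_eq_zero.mpr haw
            omega
        · have h0 : cs.count a = 0 := by simpa using List.count_eq_zero.mpr hacs
          by_cases haw : a ∈ words
          · have := hbr2 a haw; omega
          · have : words.count a = 0 := by simpa using List.count_eq_zero.mpr haw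
            omega
      rw [absLoop_true cs words hcnt]
      have hp : cs.Perm words := List.perm_iff_count.mpr (fun a => by
        have := hcnt a; exact_mod_cast this)
      have := (PySem.List.sorted_id_eq_sorted_id_iff_perm cs words).mpr hp
      simp [this]

theorem sorted_witness_ne :
    ¬ (PySem.List.sorted ["ab"] (fun x => x) false
        = PySem.List.sorted ["ab", "cd"] (fun x => x) false) := by
  intro h
  have hlen := congrArg List.length h
  rw [PySem.List.length_sorted, PySem.List.length_sorted] at hlen
  simp at hlen

theorem check_alt_witness : check_alt "ab" ["ab", "cd"] 2 = some false := by
  rw [check_alt_eq "ab" ["ab", "cd"] 2 (by norm_num)]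
  have hcf : chunksFrom "ab" 2 0 = ["ab"] := by decide
  rw [hcf]
  simp [sorted_witness_ne]

theorem check_changed : Claim_changed_check := by
  unfold Claim_changed_check
  exact ⟨by decide, by decide, by decide, by decide, check_alt_witness, by decide⟩

theorem check_tight : Claim_exact_check := by
  intro s words wl _ hpre hD
  obtain ⟨hw', hle, hex⟩ := hD
  rcases hw' with hw | hs
  case inr =>
    -- empty s: A falls through to none, B returns a some
    have hwords : words ≠ [] := by
      obtain ⟨w0, hw0, -⟩ := hex
      exact fun hc => by subst hc; exact List.not_mem_nil hw0
    subst hs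
    rw [check_empty, if_neg hwords, check_alt_empty]
    simp
  have hcs : (pvChunks s.toList wl.toNat).map String.ofList = chunksFrom s wl 0 := by
    unfold chunksFrom
    rw [List.drop_zero]
  rw [hcs] at hle hex
  rw [check_eq_absLoop s words wl hw, check_alt_eq s words wl hw]
  rw [absLoop_none (chunksFrom s wl 0) words hle hex]
  simp
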